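-- pv_equiv track=rewrite | github.com/yoavcaspi/aoc2019 | day4/solution.py | does_meet_password_criteria
-- ===== SOURCE A (Python) =====
-- def does_meet_password_criteria(num: str) -> bool:
--     if len(num) != 6:
--         return False
--     for d1, d2 in zip(num[:], num[1:]):
--         if d1 == d2:
--             break
--     else:
--         return False
--     for d1, d2 in zip(num[:], num[1:]):
--         if d1 > d2:
--             return False
--     return True
-- ===== SOURCE B (Python) =====
-- def does_meet_password_criteria(num: str) -> bool:
--     if len(num) != 6:
--         return False
--     has_double = False
--     prev = num[0]
--     for c in num[1:]:
--         if prev > c: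
--             return False
--         if prev == c:
--             has_double = True
--         prev = c
--     return has_double
-- ===== Notes on version B (the rewrite author's own statement) =====
-- stated objective: simpler
-- what changed: Replaces A's two separate scans over the adjacent-pair zip (one with a for-else to find a double, one to detect a decrease) by a single left-to-right pass carrying the previous character and a has_double flag, returning False at the first decrease.
import Mathlib
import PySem

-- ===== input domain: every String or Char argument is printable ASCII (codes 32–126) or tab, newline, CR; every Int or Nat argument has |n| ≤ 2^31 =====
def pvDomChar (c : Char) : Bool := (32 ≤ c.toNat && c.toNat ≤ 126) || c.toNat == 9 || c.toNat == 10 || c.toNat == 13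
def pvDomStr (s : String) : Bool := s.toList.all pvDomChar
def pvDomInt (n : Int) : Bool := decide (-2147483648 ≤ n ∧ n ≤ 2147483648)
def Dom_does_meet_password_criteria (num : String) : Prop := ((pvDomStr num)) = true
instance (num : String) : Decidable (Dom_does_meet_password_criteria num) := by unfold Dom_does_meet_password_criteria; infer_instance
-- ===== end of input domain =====

-- B folds A's two scans over the adjacent pairs into one pass with a has_double flag (objective: simpler).

-- ===== PORT A =====
-- first loop of A: for-else over zip(num, num[1:]); returns true iff it breaks (a double found),
-- false corresponds to the else-clause 'return False'
def pvFirstLoopA : List (Char × Char) → Bool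
  | [] => false
  | (d1, d2) :: t => if d1 == d2 then true else pvFirstLoopA t

-- second loop of A: returns false at the first decreasing pair, else true
def pvSecondLoopA : List (Char × Char) → Bool
  | [] => true
  | (d1, d2) :: t => if d1 > d2 then false else pvSecondLoopA t

def does_meet_password_criteria (num : String) : Bool :=
  if num.toList.length ≠ 6 then false
  else
    -- zip(num[:], num[1:]); num[1:] = drop 1 (exact for a nonnegative start)
    if pvFirstLoopA (num.toList.zip (num.toList.drop 1)) then
      pvSecondLoopA (num.toList.zip (num.toList.drop 1))
    else false

-- ===== PORT B =====
-- single pass: previous char, rest of the string, has_double accumulator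
def pvLoopB : Char → List Char → Bool → Bool
  | _, [], dbl => dbl
  | p, c :: t, dbl => if p > c then false else pvLoopB c t (if p == c then true else dbl)

def does_meet_password_criteria_alt (num : String) : Bool :=
  if num.toList.length ≠ 6 then false
  else
    match num.toList with
    | [] => false  -- unreachable under the length guard
    | p :: t => pvLoopB p t false

-- ===== PRECONDITION & SPEC =====
def Spec_does_meet_password_criteria (num : String) (out : Bool) : Prop := out = does_meet_password_criteria_alt num
instance (num : String) (out : Bool) : Decidable (Spec_does_meet_password_criteria num out) := by unfold Spec_does_meet_password_criteria; infer_instance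

-- ===== CLAIM (what is proved, stated in full; the proofs are below) =====
def Claim_equal_does_meet_password_criteria : Prop := ∀ (num : String), Dom_does_meet_password_criteria num → Spec_does_meet_password_criteria num (does_meet_password_criteria num)

-- ===== LEMMAS AND PROOFS =====
-- B's single pass computes exactly "no decrease AND (flag or some double)" over the same pair list
theorem pvLoopB_eq (cs : List Char) (p : Char) (dbl : Bool) :
    pvLoopB p cs dbl
      = (pvSecondLoopA ((p :: cs).zip cs) && (dbl || pvFirstLoopA ((p :: cs).zip cs))) := by
  induction cs generalizing p dbl with
  | nil => simp [pvLoopB, pvSecondLoopA, pvFirstLoopA]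
  | cons c t ih =>
    simp only [List.zip_cons_cons, pvLoopB, pvSecondLoopA, pvFirstLoopA]
    by_cases h : p > c
    · simp [h]
    · simp only [h, if_false]
      rw [ih]
      by_cases he : p == c
      · simp [he]
      · simp only [he]
        cases dbl <;> simp

-- ===== VERDICT (by name: the statement is the Claim_ definition above) =====
theorem does_meet_password_criteria_spec : Claim_equal_does_meet_password_criteria := by
  intro num _
  unfold Spec_does_meet_password_criteria does_meet_password_criteria does_meet_password_criteria_alt
  cases num.toList with
  | nil => simp
  | cons p t =>
    have key : pvLoopB p t false
        = (pvFirstLoopA ((p :: t).zip t) && pvSecondLoopA ((p :: t).zip t)) := by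
      rw [pvLoopB_eq]
      cases pvFirstLoopA ((p :: t).zip t) <;>
        cases pvSecondLoopA ((p :: t).zip t) <;> simp
    simp [key]
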